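-- pv_equiv track=rewrite | github.com/jducrest/acm | ancien trash/__pycache__/digits.py | tri_radis
-- ===== SOURCE A (Python) =====
-- def tri_radis(t,l):
-- 	for i in l:
-- 		t0=[]
-- 		t1=[]
-- 		for x in t:
-- 			if x[i]==0:
-- 				t0.append(x)
-- 			else:
-- 				t1.append(x)
-- 		t=t0+t1
-- 	return t
-- ===== SOURCE B (Python) =====
-- def tri_radis(t, l):
--     # one stable sort on the tuple of bit flags; positions of l reversed so the
--     # last-processed position of the original radix passes is most significant
--     return sorted(t, key=lambda x: tuple(0 if x[i] == 0 else 1 for i in reversed(l)))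
-- ===== Notes on version B (the rewrite author's own statement) =====
-- stated objective: simpler
-- what changed: Replaces the len(l) explicit partition passes (two accumulator lists re-concatenated per position) with a single stable sort keyed by the per-row tuple of 0/1 flags taken over reversed(l); Python's stable sort reproduces the radix tie-breaking exactly.
import Mathlib
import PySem

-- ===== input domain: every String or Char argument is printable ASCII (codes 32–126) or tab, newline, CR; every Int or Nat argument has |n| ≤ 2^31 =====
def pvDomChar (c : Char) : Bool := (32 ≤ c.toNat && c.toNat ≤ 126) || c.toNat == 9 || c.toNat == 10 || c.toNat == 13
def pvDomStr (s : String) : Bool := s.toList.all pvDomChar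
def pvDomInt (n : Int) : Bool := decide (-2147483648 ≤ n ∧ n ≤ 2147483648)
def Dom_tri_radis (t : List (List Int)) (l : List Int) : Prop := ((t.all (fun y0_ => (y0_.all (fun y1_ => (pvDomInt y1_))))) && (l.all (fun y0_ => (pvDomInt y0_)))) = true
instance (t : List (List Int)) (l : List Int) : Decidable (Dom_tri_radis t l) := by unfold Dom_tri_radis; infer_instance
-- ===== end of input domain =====

-- B replaces A's per-position partition passes with ONE stable sort keyed by the
-- tuple of 0/1 flags over reversed(l); same return value, simpler structure.


-- ===== PORT A =====
-- literal port: for each i in l, split t into t0 (x[i] == 0) and t1 (the rest), t := t0 ++ t1.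
-- x[i] is PySem.List.pyGet?; where Python raises IndexError (pyGet? = none) the else branch
-- is taken — Pre_tri_radis excludes exactly those inputs.
def tri_radis (t : List (List Int)) (l : List Int) : List (List Int) :=
  l.foldl (fun t i =>
    let p := t.foldl (fun (p : List (List Int) × List (List Int)) x =>
      if PySem.List.pyGet? x i = some 0 then (p.1 ++ [x], p.2) else (p.1, p.2 ++ [x]))
      ([], [])
    p.1 ++ p.2) t

-- ===== PORT B =====
-- literal port of Source B: one stable sort (PySem.List.sorted) on the key tuple
-- (a List Int under lexicographic order, exactly Python's tuple comparison here).
def tri_radis_alt (t : List (List Int)) (l : List Int) : List (List Int) :=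
  PySem.List.sorted t
    (fun x => l.reverse.map (fun i => if PySem.List.pyGet? x i = some 0 then (0 : Int) else 1))
    false

-- ===== PRECONDITION & SPEC =====
-- Pre_ excludes exactly the inputs where Python A raises IndexError: some position i in l
-- out of Python range for some row x of t.
def Pre_tri_radis (t : List (List Int)) (l : List Int) : Prop :=
  ∀ i ∈ l, ∀ x ∈ t, PySem.Raise.InRange x.length i
instance (t : List (List Int)) (l : List Int) : Decidable (Pre_tri_radis t l) := by
  unfold Pre_tri_radis; infer_instance
def pvWitness_tri_radis : List (List Int) × List Int := ([[1, 0], [0, 1], [1, 1]], [0, 1])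

def Spec_tri_radis (t : List (List Int)) (l : List Int) (out : List (List Int)) : Prop := out = tri_radis_alt t l
instance (t : List (List Int)) (l : List Int) (out : List (List Int)) : Decidable (Spec_tri_radis t l out) := by unfold Spec_tri_radis; infer_instance

-- ===== CLAIM (what is proved, stated in full; the proofs are below) =====
def Claim_equal_tri_radis : Prop := ∀ (t : List (List Int)) (l : List Int), Dom_tri_radis t l → Pre_tri_radis t l → Spec_tri_radis t l (tri_radis t l)

-- ===== LEMMAS AND PROOFS =====

-- the 0/1 flag of row x at position i, and the key tuple over a position list r
def pvC (i : Int) (x : List Int) : Bool := decide (PySem.List.pyGet? x i = some 0)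
def pvKey (r : List Int) (x : List Int) : List Int :=
  r.map (fun i => if PySem.List.pyGet? x i = some 0 then (0 : Int) else 1)

-- A's inner loop over t with accumulators (a, b) appends the two filters
lemma pv_pass_eq (i : Int) (t : List (List Int)) (a b : List (List Int)) :
    t.foldl (fun (p : List (List Int) × List (List Int)) x =>
      if PySem.List.pyGet? x i = some 0 then (p.1 ++ [x], p.2) else (p.1, p.2 ++ [x])) (a, b)
    = (a ++ t.filter (pvC i), b ++ t.filter (fun x => !pvC i x)) := by
  induction t generalizing a b with
  | nil => simp
  | cons x t ih =>
    by_cases h : PySem.List.pyGet? x i = some 0 <;>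
      simp [h, ih, pvC]

lemma pv_insertBy_all_before {α : Type} (bef : α → α → Bool) (x : α) (s : List α)
    (h : ∀ y ∈ s, bef x y = true) : PySem.List.insertBy bef x s = x :: s := by
  cases s with
  | nil => rfl
  | cons y ys => simp [PySem.List.insertBy, h y (by simp)]

lemma pv_insertBy_append_left {α : Type} (bef : α → α → Bool) (x : α) (u v : List α)
    (h : ∀ y ∈ v, bef x y = true) :
    PySem.List.insertBy bef x (u ++ v) = PySem.List.insertBy bef x u ++ v := by
  induction u with
  | nil => simp [pv_insertBy_all_before bef x v h, PySem.List.insertBy]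
  | cons z u ih => by_cases h2 : bef x z <;> simp [PySem.List.insertBy, h2, ih]

lemma pv_insertBy_append_right {α : Type} (bef : α → α → Bool) (x : α) (u v : List α)
    (h : ∀ y ∈ u, bef x y = false) :
    PySem.List.insertBy bef x (u ++ v) = u ++ PySem.List.insertBy bef x v := by
  induction u with
  | nil => simp
  | cons z u ih =>
    have hz : bef x z = false := h z (by simp)
    simp [PySem.List.insertBy, hz, ih (fun y hy => h y (by simp [hy]))]

lemma pv_insertBy_congr {α : Type} (bef bef' : α → α → Bool) (x : α) (s : List α)
    (h : ∀ y ∈ s, bef x y = bef' x y) :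
    PySem.List.insertBy bef x s = PySem.List.insertBy bef' x s := by
  induction s with
  | nil => rfl
  | cons y ys ih =>
    have hy := h y (by simp)
    by_cases h2 : bef x y <;>
      simp [PySem.List.insertBy, h2, ← hy, ih (fun z hz => h z (by simp [hz]))]

lemma pv_insertBy_split {α : Type} (bef : α → α → Bool) (x : α) (s : List α) :
    ∃ u v, s = u ++ v ∧ PySem.List.insertBy bef x s = u ++ x :: v := by
  induction s with
  | nil => exact ⟨[], [], rfl, rfl⟩
  | cons y ys ih =>
    by_cases h : bef x y
    · exact ⟨[], y :: ys, rfl, by simp [PySem.List.insertBy, h]⟩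
    · obtain ⟨u, v, h1, h2⟩ := ih
      exact ⟨y :: u, v, by simp [h1], by simp [PySem.List.insertBy, h, h2]⟩

lemma pv_filter_insertBy_neg {α : Type} (bef : α → α → Bool) (P : α → Bool) (x : α)
    (s : List α) (hx : P x = false) :
    (PySem.List.insertBy bef x s).filter P = s.filter P := by
  obtain ⟨u, v, h1, h2⟩ := pv_insertBy_split bef x s
  rw [h2, h1]
  simp [List.filter_append, hx]

lemma pv_lt_of_lt_of_not_lt (x y z : List Int) (h : x < y) (hz : ¬ z < y) : x < z := by
  by_cases hxz : x < z
  · exact hxz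
  · exact absurd (List.lt_of_le_of_lt hxz h) hz

lemma pv_filter_insertBy_pos {α : Type} (key : α → List Int) (P : α → Bool)
    (x : α) (s : List α) (hx : P x = true)
    (hs : s.Pairwise (fun a b => ¬ key b < key a)) :
    (PySem.List.insertBy (fun a b => decide (key a < key b)) x s).filter P
      = PySem.List.insertBy (fun a b => decide (key a < key b)) x (s.filter P) := by
  induction s with
  | nil => simp [PySem.List.insertBy, hx]
  | cons y ys ih =>
    obtain ⟨hy, hys⟩ := List.pairwise_cons.mp hs
    by_cases h : key x < key y
    · by_cases hP : P y
      · simp [PySem.List.insertBy, h, hx, hP]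
      · have hall : ∀ z ∈ ys.filter P, (fun a b => decide (key a < key b)) x z = true := by
          intro z hz
          simpa using pv_lt_of_lt_of_not_lt _ _ _ h (hy z (List.mem_of_mem_filter hz))
        have hins := pv_insertBy_all_before (fun a b => decide (key a < key b)) x (ys.filter P) hall
        simp [PySem.List.insertBy, h, hx, hP, hins]
    · by_cases hP : P y <;>
        simp [PySem.List.insertBy, h, hP, ih hys]

lemma pv_sorted_append_singleton {α : Type} (t : List α) (x : α) (key : α → List Int) :
    PySem.List.sorted (t ++ [x]) key
      = PySem.List.insertBy (fun a b => decide (key a < key b)) x (PySem.List.sorted t key) := by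
  rw [PySem.List.sorted_eq_foldl_insertBy, PySem.List.sorted_eq_foldl_insertBy,
    List.foldl_append, List.foldl_cons, List.foldl_nil]

lemma pv_insertBy_pairwise {α : Type} (key : α → List Int) (x : α) (s : List α)
    (hs : s.Pairwise (fun a b => ¬ key b < key a)) :
    (PySem.List.insertBy (fun a b => decide (key a < key b)) x s).Pairwise
      (fun a b => ¬ key b < key a) := by
  induction s with
  | nil => simp [PySem.List.insertBy]
  | cons y ys ih =>
    obtain ⟨hy, hys⟩ := List.pairwise_cons.mp hs
    by_cases h : key x < key y
    · rw [show PySem.List.insertBy (fun a b => decide (key a < key b)) x (y :: ys) = x :: y :: ys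
          from by simp [PySem.List.insertBy, h]]
      refine List.Pairwise.cons ?_ hs
      intro z hz
      rcases List.mem_cons.mp hz with hz | hz
      · subst hz; exact List.lt_asymm h
      · intro hlt
        exact hy z hz (List.lt_trans hlt h)
    · rw [show PySem.List.insertBy (fun a b => decide (key a < key b)) x (y :: ys)
            = y :: PySem.List.insertBy (fun a b => decide (key a < key b)) x ys
          from by simp [PySem.List.insertBy, h]]
      refine List.Pairwise.cons ?_ (ih hys)
      intro z hz
      rcases (PySem.List.mem_insertBy _ _ _ _).mp hz with hz | hz
      · subst hz; exact h
      · exact hy z hz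

lemma pv_sorted_pairwise {α : Type} (key : α → List Int) (t : List α) :
    (PySem.List.sorted t key).Pairwise (fun a b => ¬ key b < key a) := by
  induction t using List.reverseRecOn with
  | nil => exact List.Pairwise.nil
  | append_singleton t x ih =>
    rw [pv_sorted_append_singleton]
    exact pv_insertBy_pairwise key x _ ih

-- filtering commutes with a stable sort
lemma pv_filter_sorted {α : Type} (key : α → List Int) (P : α → Bool)
    (t : List α) :
    (PySem.List.sorted t key).filter P = PySem.List.sorted (t.filter P) key := by
  induction t using List.reverseRecOn with
  | nil => rfl
  | append_singleton t x ih =>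
    rw [pv_sorted_append_singleton, List.filter_append]
    by_cases hx : P x = true
    · rw [pv_filter_insertBy_pos key P x _ hx (pv_sorted_pairwise key t), ih]
      simp [hx, pv_sorted_append_singleton]
    · have hx' : P x = false := by simpa using hx
      rw [pv_filter_insertBy_neg _ P x _ hx', ih]
      simp [hx']

-- a stable sort by a key with a 0/1 head splits into the two blocks
lemma pv_sorted_split {α : Type} (c : α → Bool) (k : α → List Int) (t : List α) :
    PySem.List.sorted t (fun x => (if c x then (0 : Int) else 1) :: k x)
      = PySem.List.sorted (t.filter c) k
        ++ PySem.List.sorted (t.filter (fun x => !c x)) k := by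
  induction t using List.reverseRecOn with
  | nil => rfl
  | append_singleton t x ih =>
    rw [pv_sorted_append_singleton, ih]
    by_cases hc : c x
    · have h1 : ∀ y ∈ PySem.List.sorted (t.filter (fun x => !c x)) k,
          (fun a b => decide ((if c a then (0:Int) else 1) :: k a < (if c b then (0:Int) else 1) :: k b)) x y = true := by
        intro y hy
        have : c y = false := by
          have := List.of_mem_filter ((PySem.List.mem_sorted _ _ _ _).mp hy)
          simpa using this
        simp [hc, this, List.cons_lt_cons_iff]
      rw [pv_insertBy_append_left _ _ _ _ h1]
      have h2 : ∀ y ∈ PySem.List.sorted (t.filter c) k,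
          (fun a b => decide ((if c a then (0:Int) else 1) :: k a < (if c b then (0:Int) else 1) :: k b)) x y
            = (fun a b => decide (k a < k b)) x y := by
        intro y hy
        have : c y = true := List.of_mem_filter ((PySem.List.mem_sorted _ _ _ _).mp hy)
        simp [hc, this]
      rw [pv_insertBy_congr _ (fun a b => decide (k a < k b)) _ _ h2, ← pv_sorted_append_singleton]
      simp [List.filter_append, hc]
    · have h1 : ∀ y ∈ PySem.List.sorted (t.filter c) k,
          (fun a b => decide ((if c a then (0:Int) else 1) :: k a < (if c b then (0:Int) else 1) :: k b)) x y = false := by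
        intro y hy
        have : c y = true := List.of_mem_filter ((PySem.List.mem_sorted _ _ _ _).mp hy)
        simp [hc, this, List.cons_lt_cons_iff]
      rw [pv_insertBy_append_right _ _ _ _ h1]
      have h2 : ∀ y ∈ PySem.List.sorted (t.filter (fun x => !c x)) k,
          (fun a b => decide ((if c a then (0:Int) else 1) :: k a < (if c b then (0:Int) else 1) :: k b)) x y
            = (fun a b => decide (k a < k b)) x y := by
        intro y hy
        have : c y = false := by
          have := List.of_mem_filter ((PySem.List.mem_sorted _ _ _ _).mp hy)
          simpa using this
        simp [hc, this]
      rw [pv_insertBy_congr _ (fun a b => decide (k a < k b)) _ _ h2, ← pv_sorted_append_singleton]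
      simp [List.filter_append, hc]

-- the radix passes over r.reverse compute the stable sort by the key tuple over r
lemma pv_main (r : List Int) (t : List (List Int)) :
    tri_radis t r.reverse = PySem.List.sorted t (pvKey r) := by
  induction r generalizing t with
  | nil =>
    show t = PySem.List.sorted t (pvKey [])
    induction t using List.reverseRecOn with
    | nil => rfl
    | append_singleton t x ih =>
      rw [pv_sorted_append_singleton,
        PySem.List.insertBy_of_forall_not_before _ _ _ (fun y _ => rfl), ← ih]
  | cons i r ih =>
    have hstep : tri_radis t ((i :: r).reverse)
        = (tri_radis t r.reverse).filter (pvC i)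
          ++ (tri_radis t r.reverse).filter (fun x => !pvC i x) := by
      rw [List.reverse_cons]
      unfold tri_radis
      rw [List.foldl_append, List.foldl_cons, List.foldl_nil, pv_pass_eq]
      simp
    rw [hstep, ih, pv_filter_sorted, pv_filter_sorted, ← pv_sorted_split]
    have hkey : (fun x => (if pvC i x then (0 : Int) else 1) :: pvKey r x) = pvKey (i :: r) := by
      funext x
      simp [pvC, pvKey]
    rw [hkey]

-- ===== VERDICT (by name: the statement is the Claim_ definition above) =====
theorem tri_radis_spec : Claim_equal_tri_radis := by
  intro t l _ _
  unfold Spec_tri_radis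
  have h := pv_main l.reverse t
  rw [List.reverse_reverse] at h
  rw [h]
  rfl
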